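-- pv_equiv track=rewrite | github.com/emreaslan44/eegsignal | Libraries/eye_blink_clean_func.py | cluster_close_numbers
-- ===== SOURCE A (Python) =====
-- def cluster_close_numbers(numbers, threshold):
--     clusters = []
--     current_cluster = []
--     for i, n in enumerate(numbers):
--         if i == 0:
--             current_cluster.append(n)
--         else:
--             if abs(n - numbers[i - 1]) <= threshold:
--                 current_cluster.append(n)
--             else:
--                 clusters.append(current_cluster)
--                 current_cluster = [n]
--     clusters.append(current_cluster)
--     return clusters
-- ===== SOURCE B (Python) =====
-- def cluster_close_numbers(numbers, threshold):
--     n = len(numbers)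
--     breaks = [i for i in range(1, n) if abs(numbers[i] - numbers[i - 1]) > threshold]
--     bounds = [0] + breaks + [n]
--     return [numbers[a:b] for a, b in zip(bounds, bounds[1:])]
-- ===== Notes on version B (the rewrite author's own statement) =====
-- stated objective: alternative
-- what changed: Replaces A's single accumulate-current-cluster-and-flush loop by a staged pipeline: first compute the break indices where adjacent difference exceeds the threshold, then slice the list at those boundaries.
import Mathlib
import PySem

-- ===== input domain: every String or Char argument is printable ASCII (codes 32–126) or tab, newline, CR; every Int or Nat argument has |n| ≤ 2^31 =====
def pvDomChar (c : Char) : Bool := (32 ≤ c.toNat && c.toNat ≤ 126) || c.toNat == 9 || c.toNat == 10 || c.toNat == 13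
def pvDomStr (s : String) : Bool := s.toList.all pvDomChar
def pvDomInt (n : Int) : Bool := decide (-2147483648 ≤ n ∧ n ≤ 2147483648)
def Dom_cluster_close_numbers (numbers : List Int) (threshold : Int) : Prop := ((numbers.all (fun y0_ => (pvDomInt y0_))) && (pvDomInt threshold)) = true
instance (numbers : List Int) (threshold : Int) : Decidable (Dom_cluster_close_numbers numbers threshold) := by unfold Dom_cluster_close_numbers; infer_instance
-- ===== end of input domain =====

-- B computes the break indices first and then slices the list at those boundaries (staged
-- pipeline), instead of A's single accumulate-current-cluster-and-flush loop; same cost.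

-- ===== PORT A =====
-- literal transliteration of A: foldl over enumerate(numbers) carrying (clusters, current_cluster);
-- numbers[i-1] is ported as pyGetD (index always in range when read).
def cluster_close_numbers (numbers : List Int) (threshold : Int) : List (List Int) :=
  let r := (PySem.List.enumerate numbers 0).foldl
    (fun (st : List (List Int) × List Int) (p : Int × Int) =>
      if p.1 == 0 then (st.1, st.2 ++ [p.2])
      else if ((p.2 - PySem.List.pyGetD numbers (p.1 - 1) 0).natAbs : Int) ≤ threshold then
        (st.1, st.2 ++ [p.2])
      else (st.1 ++ [st.2], [p.2])) ([], [])
  r.1 ++ [r.2]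

-- ===== PORT B =====
-- Source B: breaks = indices in range(1, n) whose adjacent difference exceeds threshold
-- (numbers[i] ported as pyGetD, index always in range); bounds = [0] + breaks + [n];
-- result = one slice numbers[a:b] per consecutive pair of bounds.
def cluster_close_numbers_alt (numbers : List Int) (threshold : Int) : List (List Int) :=
  let n : Int := (numbers.length : Int)
  let breaks : List Int := (PySem.List.pyRange 1 n 1).filter (fun i =>
    decide (threshold < ((PySem.List.pyGetD numbers i 0 - PySem.List.pyGetD numbers (i - 1) 0).natAbs : Int)))
  let bounds : List Int := 0 :: (breaks ++ [n])
  (bounds.zip (breaks ++ [n])).map (fun p => PySem.List.slice numbers (some p.1) (some p.2))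

-- ===== PRECONDITION & SPEC =====
def Spec_cluster_close_numbers (numbers : List Int) (threshold : Int) (out : List (List Int)) : Prop := out = cluster_close_numbers_alt numbers threshold
instance (numbers : List Int) (threshold : Int) (out : List (List Int)) : Decidable (Spec_cluster_close_numbers numbers threshold out) := by unfold Spec_cluster_close_numbers; infer_instance

-- ===== CLAIM (what is proved, stated in full; the proofs are below) =====
def Claim_equal_cluster_close_numbers : Prop := ∀ (numbers : List Int) (threshold : Int), Dom_cluster_close_numbers numbers threshold → Spec_cluster_close_numbers numbers threshold (cluster_close_numbers numbers threshold)

-- ===== LEMMAS AND PROOFS =====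

-- common reference recursion: goA t cur p l = clusters of p-then-l given cluster-so-far cur
def goA (t : Int) (cur : List Int) (p : Int) : List Int → List (List Int)
  | [] => [cur]
  | n :: rest =>
    if ((n - p).natAbs : Int) ≤ t then goA t (cur ++ [n]) n rest
    else cur :: goA t [n] n rest

theorem goA_cons (t : Int) : ∀ (l : List Int) (p a : Int) (cur : List Int),
    goA t (a :: cur) p l = (a :: (goA t cur p l).headI) :: (goA t cur p l).tail := by
  intro l
  induction l with
  | nil => intro p a cur; simp [goA]
  | cons n rest ih =>
    intro p a cur
    simp only [goA]
    split
    · exact ih n a (cur ++ [n])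
    · simp

-- A's foldl, started anywhere past index 0, computes goA
theorem foldlA (t : Int) (full : List Int) :
    ∀ (xs : List Int) (k : Nat) (p : Int) (cls : List (List Int)) (cur : List Int),
      1 ≤ k → full.drop k = xs → PySem.List.pyGetD full ((k : Int) - 1) 0 = p →
      (let r := (PySem.List.enumerate xs (k : Int)).foldl
        (fun (st : List (List Int) × List Int) (q : Int × Int) =>
          if q.1 == 0 then (st.1, st.2 ++ [q.2])
          else if ((q.2 - PySem.List.pyGetD full (q.1 - 1) 0).natAbs : Int) ≤ t then
            (st.1, st.2 ++ [q.2])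
          else (st.1 ++ [st.2], [q.2])) (cls, cur)
       r.1 ++ [r.2]) = cls ++ goA t cur p xs := by
  intro xs
  induction xs with
  | nil => intro k p cls cur hk hd hp; simp [PySem.List.enumerate, goA]
  | cons n rest ih =>
    intro k p cls cur hk hd hp
    have hkz : ((k : Int) == 0) = false := by
      rw [beq_eq_false_iff_ne]; omega
    have hgetn : full[k]? = some n := by
      have : (full.drop k)[0]? = some n := by rw [hd]; rfl
      simpa using this
    have hgk : PySem.List.pyGetD full (((k : Nat) + 1 : Int) - 1) 0 = n := by
      have : (((k : Nat) + 1 : Int) - 1) = ((k : Nat) : Int) := by ring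
      rw [this, PySem.List.pyGetD_natCast]
      simp [List.getD, hgetn]
    have hdrop : full.drop (k + 1) = rest := by
      have : full.drop (k + 1) = (full.drop k).tail := by
        rw [List.tail_drop]
      rw [this, hd]; rfl
    simp only [PySem.List.enumerate_cons, List.foldl_cons, hkz, if_false, Bool.false_eq_true, hp]
    by_cases hc : ((n - p).natAbs : Int) ≤ t
    · rw [if_pos hc]
      have := ih (k + 1) n cls (cur ++ [n]) (by omega) hdrop (by push_cast; exact hgk)
      simp only [goA, if_pos hc]
      simpa using this
    · rw [if_neg hc]
      have := ih (k + 1) n (cls ++ [cur]) [n] (by omega) hdrop (by push_cast; exact hgk)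
      simp only [goA, if_neg hc]
      rw [show ((k : Int) + 1) = (((k + 1 : Nat) : Int)) by push_cast; ring]
      rw [this]
      simp

theorem A_eq (numbers : List Int) (t : Int) :
    cluster_close_numbers numbers t =
      (match numbers with
       | [] => [[]]
       | x :: xs => goA t [x] x xs) := by
  cases numbers with
  | nil => simp [cluster_close_numbers, PySem.List.enumerate]
  | cons x xs =>
    simp only [cluster_close_numbers, PySem.List.enumerate_cons, List.foldl_cons]
    have h0 : ((0 : Int) == 0) = true := by decide
    simp only [h0, if_true]
    have := foldlA t (x :: xs) xs 1 x [] [x] (le_refl 1) (by simp)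
      (by simp [PySem.List.pyGetD_zero_cons])
    simpa using this

-- B-side reference: slices of `full` at consecutive bounds a :: ks
def slcmap (full : List Int) : Int → List Int → List (List Int)
  | _, [] => []
  | a, k :: ks => PySem.List.slice full (some a) (some k) :: slcmap full k ks

theorem zip_map_slcmap (full : List Int) :
    ∀ (ks : List Int) (a : Int),
      (((a :: ks).zip ks).map (fun p => PySem.List.slice full (some p.1) (some p.2)))
        = slcmap full a ks := by
  intro ks
  induction ks with
  | nil => intro a; simp [slcmap]
  | cons k ks ih => intro a; simp [slcmap, ih k]

theorem slicesB (full : List Int) (t : Int) :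
    ∀ (d a : Nat), full.length - a = d → a < full.length →
      slcmap full (a : Int)
        (((PySem.List.pyRange ((a : Int) + 1) (full.length : Int) 1).filter (fun i =>
          decide (t < ((PySem.List.pyGetD full i 0 - PySem.List.pyGetD full (i - 1) 0).natAbs : Int))))
          ++ [((full.length : Int))])
        = goA t [full.getD a 0] (full.getD a 0) (full.drop (a + 1)) := by
  intro d
  induction d with
  | zero => intro a hd ha; omega
  | succ d ih =>
    intro a hd ha
    by_cases hend : full.length ≤ a + 1
    · -- a is the last index: no remaining break candidates, single slice [a:n]
      have hr : PySem.List.pyRange ((a : Int) + 1) (full.length : Int) 1 = [] :=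
        PySem.List.pyRange_one_eq_nil (by exact_mod_cast hend)
      have hdrop : full.drop (a + 1) = [] := by
        simp [List.drop_eq_nil_iff]; omega
      rw [hr, hdrop]
      simp only [List.filter_nil, List.nil_append, slcmap, goA]
      rw [PySem.List.slice_natCast]
      have h1 : full.length - a = 1 := by omega
      rw [h1, List.drop_eq_getElem_cons ha, hdrop]
      simp [List.getD, List.getElem?_eq_getElem ha]
    · have ha1 : a + 1 < full.length := by omega
      have hr : PySem.List.pyRange ((a : Int) + 1) (full.length : Int) 1
          = ((a : Int) + 1) :: PySem.List.pyRange ((a : Int) + 1 + 1) (full.length : Int) 1 :=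
        PySem.List.pyRange_one_cons (by exact_mod_cast ha1)
      have hcast : ((a : Int) + 1) = (((a + 1 : Nat)) : Int) := by push_cast; ring
      have hg1 : PySem.List.pyGetD full ((a : Int) + 1) 0 = full.getD (a + 1) 0 := by
        rw [hcast, PySem.List.pyGetD_natCast]
      have hg0 : PySem.List.pyGetD full ((a : Int) + 1 - 1) 0 = full.getD a 0 := by
        have : ((a : Int) + 1 - 1) = ((a : Nat) : Int) := by ring
        rw [this, PySem.List.pyGetD_natCast]
      have hdropc : full.drop (a + 1) = full.getD (a + 1) 0 :: full.drop (a + 1 + 1) := by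
        rw [List.drop_eq_getElem_cons ha1]
        simp [List.getD, List.getElem?_eq_getElem ha1]
      have hIH := ih (a + 1) (by omega) ha1
      rw [← hcast] at hIH
      rw [hr]
      simp only [List.filter_cons, hg1, hg0]
      rw [hdropc]
      by_cases hbrk : t < ((full.getD (a + 1) 0 - full.getD a 0).natAbs : Int)
      · -- break at a+1: A flushes [full[a]]; B's next bound is a+1, slicing off [a:a+1]
        rw [if_pos (by simpa using hbrk)]
        have hcond : ¬ (((full.getD (a + 1) 0 - full.getD a 0).natAbs : Int) ≤ t) := by omega
        simp only [List.cons_append, slcmap, goA]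
        rw [if_neg hcond, hIH]
        congr 1
        rw [hcast, PySem.List.slice_natCast]
        have h1 : a + 1 - a = 1 := by omega
        rw [h1, List.drop_eq_getElem_cons ha, List.take_succ_cons, List.take_zero]
        simp [List.getD, List.getElem?_eq_getElem ha]
      · -- no break: full[a] joins the first cluster; first slice extends one to the left
        rw [if_neg (by simpa using hbrk)]
        have hcond : (((full.getD (a + 1) 0 - full.getD a 0).natAbs : Int) ≤ t) := by omega
        simp only [goA]
        rw [if_pos hcond]
        obtain ⟨k, ks, hks⟩ : ∃ k ks,
            ((PySem.List.pyRange ((a : Int) + 1 + 1) (full.length : Int) 1).filter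
              (fun i => decide (t < ((PySem.List.pyGetD full i 0 - PySem.List.pyGetD full (i - 1) 0).natAbs : Int))))
              ++ [((full.length : Int))] = k :: ks := by
          cases h : ((PySem.List.pyRange ((a : Int) + 1 + 1) (full.length : Int) 1).filter
              (fun i => decide (t < ((PySem.List.pyGetD full i 0 - PySem.List.pyGetD full (i - 1) 0).natAbs : Int)))) with
          | nil => exact ⟨_, _, rfl⟩
          | cons y ys => exact ⟨y, ys ++ [((full.length : Int))], rfl⟩
        have hk_gt : (a : Int) + 1 < k := by
          have hk_mem : k ∈ ((PySem.List.pyRange ((a : Int) + 1 + 1) (full.length : Int) 1).filter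
              (fun i => decide (t < ((PySem.List.pyGetD full i 0 - PySem.List.pyGetD full (i - 1) 0).natAbs : Int))))
              ++ [((full.length : Int))] := by rw [hks]; exact List.mem_cons_self ..
          rcases List.mem_append.mp hk_mem with h | h
          · have := (PySem.List.mem_pyRange_one).mp (List.mem_of_mem_filter h)
            omega
          · simp only [List.mem_singleton] at h; subst h; exact_mod_cast ha1
        rw [hks] at hIH ⊢
        simp only [slcmap, List.singleton_append]
        rw [goA_cons, ← hIH]
        simp only [slcmap, List.headI, List.tail]
        congr 1
        -- slice full a k = full[a] :: slice full (a+1) k  (since a+1 < k)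
        obtain ⟨kn, hkn⟩ : ∃ kn : Nat, k = (kn : Int) := ⟨k.toNat, by omega⟩
        subst hkn
        rw [hcast, PySem.List.slice_natCast, PySem.List.slice_natCast]
        rw [List.drop_eq_getElem_cons ha]
        have h1 : kn - a = (kn - (a + 1)) + 1 := by omega
        rw [h1, List.take_succ_cons]
        simp [List.getD, List.getElem?_eq_getElem ha]

theorem B_eq (numbers : List Int) (t : Int) :
    cluster_close_numbers_alt numbers t =
      (match numbers with
       | [] => [[]]
       | x :: xs => goA t [x] x xs) := by
  unfold cluster_close_numbers_alt
  simp only []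
  rw [zip_map_slcmap]
  cases numbers with
  | nil => rfl
  | cons x xs =>
    have h := slicesB (x :: xs) t (x :: xs).length 0 rfl (by simp)
    simpa using h

-- ===== VERDICT (by name: the statement is the Claim_ definition above) =====
theorem cluster_close_numbers_spec : Claim_equal_cluster_close_numbers := by
  intro numbers threshold _
  unfold Spec_cluster_close_numbers
  rw [A_eq, B_eq]
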